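-- pv_equiv track=rewrite | github.com/mjc239/aoc23 | aoc23/day2.py | compute_minimum_set
-- ===== SOURCE A (Python) =====
-- def compute_minimum_set(game: list[dict[str, int]]) -> dict[str, int]:
--     minimum_set = {'blue': 0, 'green': 0, 'red': 0}
--     for round in game:
--         minimum_set = {
--             colour: max(minimum_set[colour], round.get(colour, 0))
--             for colour in ['blue', 'red', 'green']
--         }
--     return minimum_set
-- ===== SOURCE B (Python) =====
-- def compute_minimum_set(game: list[dict[str, int]]) -> dict[str, int]:
--     # per-colour reduction: each colour's minimum count is the max over all rounds (baseline 0)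
--     return {
--         colour: max([0, *(round.get(colour, 0) for round in game)])
--         for colour in ['blue', 'red', 'green']
--     }
-- ===== Notes on version B (the rewrite author's own statement) =====
-- stated objective: alternative
-- what changed: Instead of threading a running-max dict across rounds, B computes each colour's answer independently as one max-reduction (baseline 0) over all rounds, transposing the two iterations.
-- outside the precondition, e.g. on compute_minimum_set([]): A returns {'blue': 0, 'green': 0, 'red': 0}, B returns {'blue': 0, 'red': 0, 'green': 0}
import Mathlib
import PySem

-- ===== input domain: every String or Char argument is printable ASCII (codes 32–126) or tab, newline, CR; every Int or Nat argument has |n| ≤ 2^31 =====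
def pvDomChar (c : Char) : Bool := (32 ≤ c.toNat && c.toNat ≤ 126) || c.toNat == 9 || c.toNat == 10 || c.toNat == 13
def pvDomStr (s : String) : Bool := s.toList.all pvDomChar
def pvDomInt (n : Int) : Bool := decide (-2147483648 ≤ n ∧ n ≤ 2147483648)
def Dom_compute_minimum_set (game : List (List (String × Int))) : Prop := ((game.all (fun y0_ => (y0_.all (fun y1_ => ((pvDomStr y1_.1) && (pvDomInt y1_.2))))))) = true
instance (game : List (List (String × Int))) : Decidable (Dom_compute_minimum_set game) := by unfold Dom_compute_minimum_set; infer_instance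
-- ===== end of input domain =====

-- B computes each colour's count as an independent max-reduction over the rounds
-- (baseline 0), instead of A's running-max dict threaded round by round (alternative decomposition).


-- ===== PORT A =====
-- body of A's for-loop: the dict comprehension over the three colours.
-- minimum_set[colour] always finds its key (the state dict always has exactly these
-- three keys), so Python's d[colour] is ported exactly by getD _ colour 0 here.
def csStep (d : List (String × Int)) (round : List (String × Int)) : List (String × Int) :=
  (["blue", "red", "green"].foldl
    (fun acc c =>
      acc.insert c (max ((PySem.Dict.mk d).getD c 0) ((PySem.Dict.mk round).getD c 0)))
    PySem.Dict.empty).items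

def compute_minimum_set (game : List (List (String × Int))) : List (String × Int) :=
  game.foldl csStep [("blue", 0), ("green", 0), ("red", 0)]

-- ===== PORT B =====
-- Python's max(nonempty list) without key = PySem.List.max? with identity key;
-- the list starts with the literal 0, so it is never empty and the .getD 0 default is unreachable.
def compute_minimum_set_alt (game : List (List (String × Int))) : List (String × Int) :=
  (["blue", "red", "green"].foldl
    (fun acc c =>
      acc.insert c ((PySem.List.max?
        ((0 : Int) :: game.map (fun round => (PySem.Dict.mk round).getD c 0))
        (fun y => y)).getD 0))
    PySem.Dict.empty).items

-- ===== PRECONDITION & SPEC =====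
-- Pre_ excludes only the empty game, on which A's key order ({'blue','green','red'},
-- the initializer) versus B's ({'blue','red','green'}) is an accident of dict insertion
-- order — the two returned dicts are equal as Python dicts.
def Pre_compute_minimum_set (game : List (List (String × Int))) : Prop := game ≠ []
instance (game : List (List (String × Int))) : Decidable (Pre_compute_minimum_set game) := by
  unfold Pre_compute_minimum_set; infer_instance

def pvWitness_compute_minimum_set : (List (List (String × Int))) := [[("red", 3)]]

def Spec_compute_minimum_set (game : List (List (String × Int))) (out : List (String × Int)) : Prop := out = compute_minimum_set_alt game
instance (game : List (List (String × Int))) (out : List (String × Int)) : Decidable (Spec_compute_minimum_set game out) := by unfold Spec_compute_minimum_set; infer_instance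

-- ===== CLAIM (what is proved, stated in full; the proofs are below) =====
def Claim_equal_compute_minimum_set : Prop := ∀ (game : List (List (String × Int))), Dom_compute_minimum_set game → Pre_compute_minimum_set game → Spec_compute_minimum_set game (compute_minimum_set game)

-- ===== LEMMAS AND PROOFS =====

-- running max of getD values of colour c over a list of rounds
def fm (c : String) (init : Int) (game : List (List (String × Int))) : Int :=
  game.foldl (fun m r => max m ((PySem.Dict.mk r).getD c 0)) init

lemma csStep_eq (d r : List (String × Int)) :
    csStep d r = [("blue", max ((PySem.Dict.mk d).getD "blue" 0) ((PySem.Dict.mk r).getD "blue" 0)),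
                  ("red",  max ((PySem.Dict.mk d).getD "red" 0)  ((PySem.Dict.mk r).getD "red" 0)),
                  ("green", max ((PySem.Dict.mk d).getD "green" 0) ((PySem.Dict.mk r).getD "green" 0))] := by
  simp [csStep, List.foldl, PySem.Dict.insert, PySem.Dict.empty, PySem.Dict.contains]

lemma getD_three (x y z : Int) :
    (PySem.Dict.mk [("blue", x), ("red", y), ("green", z)]).getD "blue" 0 = x ∧
    (PySem.Dict.mk [("blue", x), ("red", y), ("green", z)]).getD "red" 0 = y ∧
    (PySem.Dict.mk [("blue", x), ("red", y), ("green", z)]).getD "green" 0 = z := by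
  refine ⟨?_, ?_, ?_⟩ <;>
    simp [PySem.Dict.getD, PySem.Dict.get?]

lemma loopA (game : List (List (String × Int))) (x y z : Int) :
    game.foldl csStep [("blue", x), ("red", y), ("green", z)] =
      [("blue", fm "blue" x game), ("red", fm "red" y game), ("green", fm "green" z game)] := by
  induction game generalizing x y z with
  | nil => simp [fm]
  | cons r t ih =>
      have h := getD_three x y z
      rw [List.foldl_cons, csStep_eq, h.1, h.2.1, h.2.2, ih]
      simp [fm, List.foldl_cons]

lemma altB_eq (game : List (List (String × Int))) :
    compute_minimum_set_alt game =
      [("blue", fm "blue" 0 game), ("red", fm "red" 0 game), ("green", fm "green" 0 game)] := by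
  simp [compute_minimum_set_alt, List.foldl, PySem.Dict.insert, PySem.Dict.empty, PySem.Dict.contains, PySem.List.max?_id_cons, fm, List.foldl_map]

-- ===== VERDICT (by name: the statement is the Claim_ definition above) =====
theorem compute_minimum_set_spec : Claim_equal_compute_minimum_set := by
  intro game _ hpre
  unfold Spec_compute_minimum_set
  cases game with
  | nil => exact absurd rfl hpre
  | cons r t =>
      rw [altB_eq]
      show List.foldl csStep _ (r :: t) = _
      rw [List.foldl_cons]
      have hinit : csStep [("blue", 0), ("green", 0), ("red", 0)] r =
          [("blue", max 0 ((PySem.Dict.mk r).getD "blue" 0)),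
           ("red",  max 0 ((PySem.Dict.mk r).getD "red" 0)),
           ("green", max 0 ((PySem.Dict.mk r).getD "green" 0))] := by
        rw [csStep_eq]
        simp [PySem.Dict.getD, PySem.Dict.get?]
      rw [hinit, loopA]
      simp [fm, List.foldl_cons]
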